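-- pv_equiv track=rewrite | github.com/DHAVAL-TANK/Leetcode | DP/converts1intos2.py | canYouMake
-- ===== SOURCE A (Python) =====
-- def canYouMake(s1: str, s2: str) -> int:
--     l1 = len(s1)
--     l2 = len(s2)
--
--     dp = [[0] * (l2+1) for _ in range(0,l1+1)]
--
--     for i in range(1,l1+1):
--         for j in range (1,l2+1):
--             if s1[i-1] == s2 [j-1]:
--                 dp[i][j] = 1 + dp[i-1][j-1]
--             else:
--                 dp[i][j] = max(dp[i-1][j],dp[i][j-1])
--
--     return l1+l2 - (2 * dp[l1][l2])
-- ===== SOURCE B (Python) =====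
-- def canYouMake(s1: str, s2: str) -> int:
--     # Top-down memoized evaluation: only the subproblems reachable from
--     # (len(s1), len(s2)) are computed, on demand, driven by an explicit
--     # work stack (instead of filling a bottom-up table row by row).
--     memo = {}
--
--     def lcs(i0, j0):
--         stack = [(i0, j0)]
--         while stack:
--             i, j = stack[-1]
--             if i == 0 or j == 0:
--                 memo[(i, j)] = 0
--                 stack.pop()
--             elif (i, j) in memo:
--                 stack.pop()
--             elif s1[i - 1] == s2[j - 1]:
--                 d = memo.get((i - 1, j - 1))
--                 if d is not None:
--                     memo[(i, j)] = 1 + d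
--                     stack.pop()
--                 else:
--                     stack.append((i - 1, j - 1))
--             else:
--                 u = memo.get((i - 1, j))
--                 v = memo.get((i, j - 1))
--                 if u is not None and v is not None:
--                     memo[(i, j)] = max(u, v)
--                     stack.pop()
--                 else:
--                     if u is None:
--                         stack.append((i - 1, j))
--                     if v is None:
--                         stack.append((i, j - 1))
--         return memo[(i0, j0)]
--
--     return len(s1) + len(s2) - 2 * lcs(len(s1), len(s2))
-- ===== Notes on version B (the rewrite author's own statement) =====
-- stated objective: alternative
-- what changed: Replaces A's bottom-up (l1+1)x(l2+1) DP table sweep by top-down memoized evaluation: subproblems are computed on demand starting from (l1,l2), driven by an explicit work stack and a dict cache, so no table is built and no fixed row/column sweep happens.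
import Mathlib
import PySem

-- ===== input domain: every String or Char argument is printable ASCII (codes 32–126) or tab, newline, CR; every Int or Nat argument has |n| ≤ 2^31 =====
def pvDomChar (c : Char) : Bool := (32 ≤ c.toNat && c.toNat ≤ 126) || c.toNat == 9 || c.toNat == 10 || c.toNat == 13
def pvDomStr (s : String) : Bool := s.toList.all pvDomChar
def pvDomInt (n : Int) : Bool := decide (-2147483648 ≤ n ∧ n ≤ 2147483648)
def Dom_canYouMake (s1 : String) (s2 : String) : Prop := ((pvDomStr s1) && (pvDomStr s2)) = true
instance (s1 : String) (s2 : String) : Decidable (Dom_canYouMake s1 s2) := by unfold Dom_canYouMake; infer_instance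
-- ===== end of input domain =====

-- B replaces A's bottom-up full-table DP sweep by top-down memoized evaluation from (l1,l2),
-- driven by an explicit work stack and a dict cache; same return value on all inputs.

-- ===== PORT A =====
-- All pyGetD/pySetD indices below are in range on every reachable state, so the total forms are exact.
-- inner loop body of A (the j-loop step), as a named helper
def aInner (s1 : String) (s2 : String) (i : Int) (dp : List (List Int)) (j : Int) : List (List Int) :=
  let v : Int :=
    if PySem.Str.pyGet? s1 (i-1) = PySem.Str.pyGet? s2 (j-1) then
      1 + PySem.List.pyGetD (PySem.List.pyGetD dp (i-1) []) (j-1) 0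
    else
      max (PySem.List.pyGetD (PySem.List.pyGetD dp (i-1) []) j 0)
          (PySem.List.pyGetD (PySem.List.pyGetD dp i []) (j-1) 0)
  PySem.List.pySetD dp i (PySem.List.pySetD (PySem.List.pyGetD dp i []) j v)

-- outer loop body of A (the i-loop step)
def aOuter (s1 : String) (s2 : String) (l2 : Int) (dp : List (List Int)) (i : Int) : List (List Int) :=
  (PySem.List.pyRange 1 (l2+1) 1).foldl (aInner s1 s2 i) dp

def canYouMake (s1 : String) (s2 : String) : Int :=
  let l1 : Int := PySem.Str.len s1
  let l2 : Int := PySem.Str.len s2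
  let dp0 : List (List Int) :=
    (PySem.List.pyRange 0 (l1+1) 1).map (fun _ => PySem.List.pyRepeat [(0:Int)] (l2+1))
  let dp := (PySem.List.pyRange 1 (l1+1) 1).foldl (aOuter s1 s2 l2) dp0
  l1 + l2 - 2 * PySem.List.pyGetD (PySem.List.pyGetD dp l1 []) l2 0

-- ===== PORT B =====
-- Source B's while-loop over the explicit work stack (head of the list = top of the stack);
-- the Nat fuel only makes the while-loop total in Lean (proved sufficient below) — it guards nothing else.
def lcsStack (s1 : String) (s2 : String) : Nat → List (Int × Int) → PySem.Dict (Int × Int) Int → PySem.Dict (Int × Int) Int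
  | _, [], memo => memo
  | 0, _ :: _, memo => memo
  | fuel+1, (i, j) :: rest, memo =>
    if i = 0 ∨ j = 0 then
      lcsStack s1 s2 fuel rest (memo.insert (i, j) 0)
    else if memo.contains (i, j) then
      lcsStack s1 s2 fuel rest memo
    else if PySem.Str.pyGet? s1 (i - 1) = PySem.Str.pyGet? s2 (j - 1) then
      match memo.get? (i - 1, j - 1) with
      | some d => lcsStack s1 s2 fuel rest (memo.insert (i, j) (1 + d))
      | none => lcsStack s1 s2 fuel ((i - 1, j - 1) :: (i, j) :: rest) memo
    else
      match memo.get? (i - 1, j), memo.get? (i, j - 1) with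
      | some u, some v => lcsStack s1 s2 fuel rest (memo.insert (i, j) (max u v))
      | some _, none => lcsStack s1 s2 fuel ((i, j - 1) :: (i, j) :: rest) memo
      | none, some _ => lcsStack s1 s2 fuel ((i - 1, j) :: (i, j) :: rest) memo
      | none, none => lcsStack s1 s2 fuel ((i, j - 1) :: (i - 1, j) :: (i, j) :: rest) memo

def canYouMake_alt (s1 : String) (s2 : String) : Int :=
  let l1 : Int := PySem.Str.len s1
  let l2 : Int := PySem.Str.len s2
  let memo := lcsStack s1 s2 (3 ^ (s1.toList.length + s2.toList.length + 2)) [(l1, l2)] PySem.Dict.empty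
  l1 + l2 - 2 * memo.getD (l1, l2) 0

-- ===== PRECONDITION & SPEC =====
def Spec_canYouMake (s1 : String) (s2 : String) (out : Int) : Prop := out = canYouMake_alt s1 s2
instance (s1 : String) (s2 : String) (out : Int) : Decidable (Spec_canYouMake s1 s2 out) := by unfold Spec_canYouMake; infer_instance

-- ===== CLAIM (what is proved, stated in full; the proofs are below) =====
def Claim_equal_canYouMake : Prop := ∀ (s1 : String) (s2 : String), Dom_canYouMake s1 s2 → Spec_canYouMake s1 s2 (canYouMake s1 s2)

-- ===== LEMMAS AND PROOFS =====

-- the shared LCS-of-prefixes recurrence both ports are related to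
def lcsN (x y : List Char) : Nat → Nat → Nat
  | 0, _ => 0
  | _+1, 0 => 0
  | a+1, b+1 =>
    if x[a]? = y[b]? then lcsN x y a b + 1
    else max (lcsN x y a (b+1)) (lcsN x y (a+1) b)
termination_by a b => a + b

theorem lcsN_zero_left (x y : List Char) (b : Nat) : lcsN x y 0 b = 0 := by
  simp [lcsN]

theorem lcsN_zero_right (x y : List Char) (a : Nat) : lcsN x y a 0 = 0 := by
  cases a <;> simp [lcsN]

theorem lcsN_succ_succ (x y : List Char) (a b : Nat) :
    lcsN x y (a+1) (b+1) =
      if x[a]? = y[b]? then lcsN x y a b + 1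
      else max (lcsN x y a (b+1)) (lcsN x y (a+1) b) := by
  simp [lcsN]

-- ---- A-side: rolling-row helpers (proof-only) and the table-fold characterisation ----
def bRow (a : Char) : List Char → List Int → Int → Int → List Int
  | b :: bs, p :: ps, diag, left =>
      let v := if a = b then diag + 1 else max p left
      v :: bRow a bs ps p v
  | _, _, _, _ => []

def bStep (c2 : List Char) (prev : List Int) (a : Char) : List Int :=
  0 :: bRow a c2 (prev.drop 1) (prev.headD 0) 0

theorem bRow_length (a : Char) : ∀ (bs : List Char) (ps : List Int) (d l : Int),
    (bRow a bs ps d l).length = min bs.length ps.length := by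
  intro bs
  induction bs with
  | nil => intro ps d l; cases ps <;> simp [bRow]
  | cons b bs ih => intro ps d l; cases ps <;> simp [bRow, ih]

theorem bStep_length (c2 : List Char) (prev : List Int) (a : Char)
    (h : prev.length = c2.length + 1) :
    (bStep c2 prev a).length = c2.length + 1 := by
  simp [bStep, bRow_length, h]

theorem getD_append_cons {α : Type} (xs : List α) (y : α) (l : List α) (d : α) :
    (xs ++ y :: l).getD xs.length d = y := by
  induction xs with
  | nil => rfl
  | cons x xs ih => simpa using ih

theorem getD_append_cons_succ {α : Type} (xs : List α) (y z : α) (l : List α) (d : α) :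
    (xs ++ y :: z :: l).getD (xs.length + 1) d = z := by
  induction xs with
  | nil => rfl
  | cons x xs ih => simpa using ih

theorem set_append_cons_succ {α : Type} (xs : List α) (y z v : α) (l : List α) :
    (xs ++ y :: z :: l).set (xs.length + 1) v = xs ++ y :: v :: l := by
  induction xs with
  | nil => rfl
  | cons x xs ih => simpa using ih

-- A's inner j-loop, started at j = u.length+1 on a partially built current row,
-- completes the row exactly as the bRow scan does.
theorem inner_loop (s1 s2 : String) (a : Char) (i0 : Int)
    (front rest : List (List Int))
    (hi0 : i0 = (front.length : Int) + 1)
    (hs1 : PySem.Str.pyGet? s1 (i0 - 1) = some a) :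
    ∀ (bs : List Char) (ps : List Int) (u : List Char) (pv cd : List Int) (diag left : Int),
      s2.toList = u ++ bs →
      pv.length = u.length →
      cd.length = u.length →
      bs.length = ps.length →
      (PySem.List.pyRange ((u.length : Int) + 1) ((s2.toList.length : Int) + 1) 1).foldl
        (aInner s1 s2 i0)
        (front ++ (pv ++ diag :: ps) :: ((cd ++ [left]) ++ List.replicate bs.length 0) :: rest)
      = front ++ (pv ++ diag :: ps) :: ((cd ++ [left]) ++ bRow a bs ps diag left) :: rest := by
  intro bs
  induction bs with
  | nil =>
    intro ps u pv cd diag left hc2 hpv hcd hlen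
    obtain rfl : ps = [] := by cases ps <;> simp_all
    have hm : s2.toList.length = u.length := by rw [hc2]; simp
    rw [hm, PySem.List.pyRange_one_eq_nil (by omega)]
    simp [bRow]
  | cons b bs' ih =>
    intro ps u pv cd diag left hc2 hpv hcd hlen
    obtain ⟨p, ps', rfl⟩ : ∃ p ps', ps = p :: ps' := by
      cases ps with
      | nil => simp at hlen
      | cons p ps' => exact ⟨p, ps', rfl⟩
    have hm : s2.toList.length = u.length + (bs'.length + 1) := by rw [hc2]; simp
    rw [PySem.List.pyRange_one_cons (by omega)]
    rw [List.foldl_cons]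
    have hstep :
        aInner s1 s2 i0
          (front ++ (pv ++ diag :: p :: ps') :: ((cd ++ [left]) ++ List.replicate (b :: bs').length 0) :: rest)
          ((u.length : Int) + 1)
        = front ++ (pv ++ diag :: p :: ps') ::
            (((cd ++ [left]) ++ [if a = b then diag + 1 else max p left]) ++ List.replicate bs'.length 0) :: rest := by
      unfold aInner
      have e1 : ((u.length : Int) + 1) - 1 = (u.length : Int) := by ring
      have e2 : i0 - 1 = (front.length : Int) := by rw [hi0]; ring
      have e3 : i0 = ((front.length + 1 : Nat) : Int) := by rw [hi0]; push_cast; ring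
      have e4 : ((u.length : Int) + 1) = ((u.length + 1 : Nat) : Int) := by push_cast; ring
      have hs2 : PySem.Str.pyGet? s2 ((u.length : Int)) = some b := by
        rw [PySem.Str.pyGet?_natCast, hc2]
        simp
      have hs1' : PySem.Str.pyGet? s1 ((front.length : Int)) = some a := by rw [← e2]; exact hs1
      rw [e1, e2, e3, e4, hs1', hs2]
      simp only [PySem.List.pyGetD_natCast, PySem.List.pySetD_natCast]
      have hprev : (front ++ (pv ++ diag :: p :: ps') :: ((cd ++ [left]) ++ List.replicate (b :: bs').length 0) :: rest).getD front.length [] = pv ++ diag :: p :: ps' :=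
        getD_append_cons front _ _ []
      have hcur : (front ++ (pv ++ diag :: p :: ps') :: ((cd ++ [left]) ++ List.replicate (b :: bs').length 0) :: rest).getD (front.length + 1) [] = (cd ++ [left]) ++ List.replicate (b :: bs').length 0 :=
        getD_append_cons_succ front _ _ _ []
      rw [hprev, hcur]
      have hdiag : (pv ++ diag :: p :: ps').getD u.length 0 = diag := by
        rw [← hpv]; exact getD_append_cons pv _ _ 0
      have hp : (pv ++ diag :: p :: ps').getD (u.length + 1) 0 = p := by
        rw [← hpv]; exact getD_append_cons_succ pv _ _ _ 0
      have hleft : ((cd ++ [left]) ++ List.replicate (b :: bs').length 0).getD u.length 0 = left := by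
        have : (cd ++ [left]) ++ List.replicate (b :: bs').length 0 = cd ++ left :: List.replicate (b :: bs').length 0 := by simp
        rw [this, ← hcd]; exact getD_append_cons cd _ _ 0
      rw [hdiag, hp, hleft]
      have hsetcur : ((cd ++ [left]) ++ List.replicate (b :: bs').length 0).set (u.length + 1)
            (if some a = some b then 1 + diag else max p left)
          = (cd ++ [left]) ++ (if a = b then diag + 1 else max p left) :: List.replicate bs'.length 0 := by
        have h1 : (cd ++ [left]) ++ List.replicate (b :: bs').length 0 = cd ++ left :: (0:Int) :: List.replicate bs'.length 0 := by
          simp [List.replicate_succ]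
        rw [h1, ← hcd, set_append_cons_succ]
        have h2 : (if some a = some b then 1 + diag else max p left) = (if a = b then diag + 1 else max p left) := by
          by_cases h : a = b <;> simp [h] <;> ring
        rw [h2]; simp
      rw [hsetcur]
      have hsetdp : (front ++ (pv ++ diag :: p :: ps') :: ((cd ++ [left]) ++ List.replicate (b :: bs').length 0) :: rest).set (front.length + 1)
            ((cd ++ [left]) ++ (if a = b then diag + 1 else max p left) :: List.replicate bs'.length 0)
          = front ++ (pv ++ diag :: p :: ps') :: ((cd ++ [left]) ++ (if a = b then diag + 1 else max p left) :: List.replicate bs'.length 0) :: rest :=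
        set_append_cons_succ front _ _ _ rest
      rw [hsetdp]
      simp
    rw [hstep]
    have hrec := ih ps' (u ++ [b]) (pv ++ [diag]) (cd ++ [left]) p (if a = b then diag + 1 else max p left)
      (by rw [hc2]; simp) (by simp [hpv]) (by simp [hcd]) (by simpa using hlen)
    have ecast : ((u.length : Int) + 1) + 1 = (((u ++ [b]).length : Int) + 1) := by push_cast; simp
    rw [ecast]
    simpa [bRow, List.append_assoc] using hrec

-- A's outer i-loop, started after u, builds exactly the successive rolling rows.
theorem outer_loop (s1 s2 : String) :
    ∀ (bs u : List Char) (rl : List (List Int)) (prev : List Int),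
      s1.toList = u ++ bs →
      rl.length = u.length →
      prev.length = s2.toList.length + 1 →
      ∃ R : List (List Int), R.length = u.length + bs.length ∧
        (PySem.List.pyRange ((u.length : Int) + 1) ((s1.toList.length : Int) + 1) 1).foldl
          (aOuter s1 s2 ((s2.toList.length : Int)))
          (rl ++ prev :: List.replicate bs.length (List.replicate (s2.toList.length + 1) 0))
        = R ++ [bs.foldl (bStep s2.toList) prev] := by
  intro bs
  induction bs with
  | nil =>
    intro u rl prev hc1 hrl hprev
    have hn : s1.toList.length = u.length := by rw [hc1]; simp
    rw [hn, PySem.List.pyRange_one_eq_nil (by omega)]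
    exact ⟨rl, by simpa using hrl, by simp⟩
  | cons a bs' ih =>
    intro u rl prev hc1 hrl hprev
    have hn : s1.toList.length = u.length + (bs'.length + 1) := by rw [hc1]; simp
    rw [PySem.List.pyRange_one_cons (by omega)]
    rw [List.foldl_cons]
    obtain ⟨diag, ps, rfl⟩ : ∃ d ps, prev = d :: ps := by
      cases prev with
      | nil => simp at hprev
      | cons d ps => exact ⟨d, ps, rfl⟩
    have hstep :
        aOuter s1 s2 ((s2.toList.length : Int))
          (rl ++ (diag :: ps) :: List.replicate (a :: bs').length (List.replicate (s2.toList.length + 1) 0))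
          ((u.length : Int) + 1)
        = rl ++ (diag :: ps) :: (bStep s2.toList (diag :: ps) a) :: List.replicate bs'.length (List.replicate (s2.toList.length + 1) 0) := by
      unfold aOuter
      have hs1a : PySem.Str.pyGet? s1 (((u.length : Int) + 1) - 1) = some a := by
        have e : ((u.length : Int) + 1) - 1 = ((u.length : Nat) : Int) := by ring
        rw [e, PySem.Str.pyGet?_natCast, hc1]
        simp
      have hinner := inner_loop s1 s2 a ((u.length : Int) + 1) rl
        (List.replicate bs'.length (List.replicate (s2.toList.length + 1) 0))
        (by rw [hrl]) hs1a s2.toList ps [] [] [] diag 0 (by simp)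
        (by simp) (by simp) (by simp only [List.length_cons] at hprev; omega)
      have e0 : ((([] : List Char).length : Int) + 1) = (1 : Int) := by simp
      rw [e0] at hinner
      have hshape : rl ++ (diag :: ps) :: List.replicate (a :: bs').length (List.replicate (s2.toList.length + 1) 0)
          = rl ++ ([] ++ diag :: ps) :: (([] ++ [(0:Int)]) ++ List.replicate s2.toList.length 0) :: List.replicate bs'.length (List.replicate (s2.toList.length + 1) 0) := by
        simp [List.replicate_succ]
      rw [hshape, hinner]
      simp [bStep]
    rw [hstep]
    have hrec := ih (u ++ [a]) (rl ++ [diag :: ps]) (bStep s2.toList (diag :: ps) a)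
      (by rw [hc1]; simp) (by simp [hrl]) (bStep_length _ _ _ hprev)
    have ecast : ((u.length : Int) + 1) + 1 = (((u ++ [a]).length : Int) + 1) := by push_cast; simp
    rw [ecast]
    obtain ⟨R, hRlen, hR⟩ := hrec
    refine ⟨R, by simp at hRlen; simp; omega, ?_⟩
    have hassoc : (rl ++ (diag :: ps) :: bStep s2.toList (diag :: ps) a :: List.replicate bs'.length (List.replicate (s2.toList.length + 1) 0)) = (rl ++ [diag :: ps] ++ bStep s2.toList (diag :: ps) a :: List.replicate bs'.length (List.replicate (s2.toList.length + 1) 0)) := by simp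
    rw [hassoc, hR, List.foldl_cons]

-- ---- the rolling rows are the rows of lcsN ----
def rowN (x y : List Char) (i : Nat) : List Int :=
  (List.range (y.length + 1)).map (fun j => (lcsN x y i j : Int))

theorem bRow_lcs (x y : List Char) (i : Nat) (hi : i < x.length) :
    ∀ (c u : Nat), u + c = y.length →
      bRow x[i] (y.drop u)
        ((List.range' (u+1) c).map (fun j => (lcsN x y i j : Int)))
        ((lcsN x y i u : Nat) : Int) ((lcsN x y (i+1) u : Nat) : Int)
      = (List.range' (u+1) c).map (fun j => (lcsN x y (i+1) j : Int)) := by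
  intro c
  induction c with
  | zero =>
    intro u hu
    have : y.drop u = [] := by
      apply List.drop_eq_nil_of_le; omega
    simp [this, bRow]
  | succ c ih =>
    intro u hu
    have hu' : u < y.length := by omega
    have hdrop : y.drop u = y[u] :: y.drop (u+1) := List.drop_eq_getElem_cons hu'
    rw [hdrop, List.range'_succ, List.map_cons, List.map_cons]
    show bRow x[i] (y[u] :: y.drop (u+1))
        (((lcsN x y i (u+1) : Nat) : Int) :: (List.range' (u+2) c).map (fun j => (lcsN x y i j : Int)))
        _ _ = _
    rw [bRow]
    have hval : (if x[i] = y[u] then ((lcsN x y i u : Nat) : Int) + 1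
        else max ((lcsN x y i (u+1) : Nat) : Int) ((lcsN x y (i+1) u : Nat) : Int))
        = ((lcsN x y (i+1) (u+1) : Nat) : Int) := by
      rw [lcsN_succ_succ]
      by_cases h : x[i] = y[u]
      · have : x[i]? = y[u]? := by
          rw [List.getElem?_eq_getElem hi, List.getElem?_eq_getElem hu', h]
        simp [h, this]
      · have : ¬ (x[i]? = y[u]?) := by
          rw [List.getElem?_eq_getElem hi, List.getElem?_eq_getElem hu']
          simpa using h
        simp [h, this, Nat.cast_max]
    simp only [hval]
    congr 1
    have := ih (u+1) (by omega)
    simpa using this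

theorem bStep_rowN (x y : List Char) (i : Nat) (hi : i < x.length) :
    bStep y (rowN x y i) x[i] = rowN x y (i+1) := by
  unfold rowN bStep
  have hrange : List.range (y.length + 1) = 0 :: List.range' 1 y.length := by
    rw [List.range_eq_range', List.range'_succ]
  rw [hrange, List.map_cons, List.map_cons]
  simp only [List.drop_succ_cons, List.drop_zero, List.headD_cons]
  have h0l : ((lcsN x y i 0 : Nat) : Int) = 0 := by rw [lcsN_zero_right]; simp
  have h0r : ((lcsN x y (i+1) 0 : Nat) : Int) = 0 := by rw [lcsN_zero_right]; simp
  have hb := bRow_lcs x y i hi y.length 0 (by omega)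
  simp only [List.drop_zero, Nat.zero_add] at hb
  rw [h0l, h0r] at hb
  rw [h0l, h0r, hb]

theorem foldl_bStep_rowN (x y : List Char) :
    ∀ (l : List Char) (i : Nat), x.drop i = l → i + l.length = x.length →
      l.foldl (bStep y) (rowN x y i) = rowN x y x.length := by
  intro l
  induction l with
  | nil =>
    intro i _ hlen
    simp at hlen
    simp [hlen]
  | cons a l' ih =>
    intro i hdrop hlen
    have hi : i < x.length := by simp at hlen; omega
    have hcons : x[i] :: x.drop (i+1) = a :: l' := by
      rw [List.getElem_cons_drop hi, hdrop]
    have ha : x[i] = a := by injection hcons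
    have hdrop' : x.drop (i+1) = l' := by injection hcons
    rw [List.foldl_cons, ← ha, bStep_rowN x y i hi]
    exact ih (i+1) hdrop' (by simp at hlen ⊢; omega)

-- A's return value, characterised through lcsN
theorem A_eq_lcsN (s1 s2 : String) :
    canYouMake s1 s2 =
      (s1.toList.length : Int) + (s2.toList.length : Int)
        - 2 * ((lcsN s1.toList s2.toList s1.toList.length s2.toList.length : Nat) : Int) := by
  unfold canYouMake
  simp only [PySem.Str.len_eq]
  set n := s1.toList.length with hn
  set m := s2.toList.length with hm
  have hdp0 : (PySem.List.pyRange 0 ((n : Int) + 1) 1).map (fun _ => PySem.List.pyRepeat [(0:Int)] ((m : Int) + 1))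
      = List.replicate (n + 1) (List.replicate (m + 1) (0 : Int)) := by
    have h1 : PySem.List.pyRepeat [(0:Int)] ((m : Int) + 1) = List.replicate (m + 1) (0 : Int) := by
      rw [PySem.List.pyRepeat_singleton]
      norm_num
    rw [h1, List.map_const', PySem.List.length_pyRange_one]
    norm_num
  rw [hdp0]
  have houter := outer_loop s1 s2 s1.toList [] [] (List.replicate (m + 1) 0)
    (by simp) (by simp) (by rw [List.length_replicate, hm])
  have e0 : ((([] : List Char).length : Int) + 1) = (1 : Int) := by simp
  rw [e0] at houter
  obtain ⟨R, hRlen, hR⟩ := houter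
  have hshape : List.replicate (n + 1) (List.replicate (m + 1) (0:Int))
      = ([] : List (List Int)) ++ (List.replicate (m + 1) (0:Int)) :: List.replicate s1.toList.length (List.replicate (m + 1) 0) := by
    simp [← hn, List.replicate_succ]
  rw [hshape]
  rw [hR]
  have hinit : rowN s1.toList s2.toList 0 = List.replicate (m + 1) (0:Int) := by
    unfold rowN
    rw [← hm]
    rw [List.eq_replicate_iff]
    constructor
    · simp
    · intro b hb
      simp only [List.mem_map] at hb
      obtain ⟨j, _, rfl⟩ := hb
      rw [lcsN_zero_left]
      simp
  have hF : s1.toList.foldl (bStep s2.toList) (List.replicate (m + 1) 0) = rowN s1.toList s2.toList n := by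
    rw [← hinit]
    exact foldl_bStep_rowN s1.toList s2.toList s1.toList 0 (by simp) (by simp [hn])
  rw [hF]
  have hdpn : PySem.List.pyGetD (R ++ [rowN s1.toList s2.toList n]) ((n : Int)) [] = rowN s1.toList s2.toList n := by
    rw [PySem.List.pyGetD_natCast]
    have : n = R.length := by omega
    rw [this]
    exact getD_append_cons R _ [] []
  rw [hdpn]
  have hFm : PySem.List.pyGetD (rowN s1.toList s2.toList n) ((m : Int)) 0
      = ((lcsN s1.toList s2.toList n m : Nat) : Int) := by
    rw [PySem.List.pyGetD_natCast]
    unfold rowN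
    rw [← hm]
    have : List.range (m + 1) = List.range m ++ [m] := List.range_succ
    rw [this, List.map_append]
    simpa using getD_append_cons ((List.range m).map (fun j => (lcsN s1.toList s2.toList n j : Int))) _ [] 0
  rw [hFm]

-- ---- B-side: the stack machine computes lcsN ----

def MemoInv (x y : List Char) (memo : PySem.Dict (Int × Int) Int) : Prop :=
  ∀ (a b : Nat) (v : Int), memo.get? ((a : Int), (b : Int)) = some v → v = ((lcsN x y a b : Nat) : Int)

def MemoSub (m m' : PySem.Dict (Int × Int) Int) : Prop :=
  ∀ (k : Int × Int) (v : Int), m.get? k = some v → m'.get? k = some v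

theorem memo_insert_keep (x y : List Char) (memo : PySem.Dict (Int × Int) Int)
    (a b : Nat) (v : Int) (hInv : MemoInv x y memo)
    (hv : v = ((lcsN x y a b : Nat) : Int)) :
    MemoInv x y (memo.insert ((a : Int), (b : Int)) v) ∧
    MemoSub memo (memo.insert ((a : Int), (b : Int)) v) ∧
    (memo.insert ((a : Int), (b : Int)) v).get? ((a : Int), (b : Int)) = some v := by
  refine ⟨?_, ?_, ?_⟩
  · intro c d w hw
    rw [PySem.Dict.get?_insert] at hw
    by_cases h : ((c : Int), (d : Int)) = ((a : Int), (b : Int))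
    · have hc : c = a ∧ d = b := by
        have := h
        simp only [Prod.mk.injEq, Nat.cast_inj] at this
        exact this
      rw [if_pos h] at hw
      obtain ⟨rfl, rfl⟩ := hc
      injection hw with hw'
      rw [← hw', hv]
    · rw [if_neg h] at hw
      exact hInv c d w hw
  · intro k w hw
    rw [PySem.Dict.get?_insert]
    by_cases h : k = ((a : Int), (b : Int))
    · rw [if_pos h]
      rw [h] at hw
      have := hInv a b w hw
      rw [this, ← hv]
    · rw [if_neg h]; exact hw
  · exact PySem.Dict.get?_insert_self _ _ _

theorem memoSub_trans {m1 m2 m3 : PySem.Dict (Int × Int) Int}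
    (h1 : MemoSub m1 m2) (h2 : MemoSub m2 m3) : MemoSub m1 m3 :=
  fun k v h => h2 k v (h1 k v h)

-- one-step unfolding of the while-loop body
theorem lcsStack_cons_eq (s1 s2 : String) (f : Nat) (i j : Int) (rest : List (Int × Int))
    (memo : PySem.Dict (Int × Int) Int) :
    lcsStack s1 s2 (f+1) ((i, j) :: rest) memo =
      (if i = 0 ∨ j = 0 then
        lcsStack s1 s2 f rest (memo.insert (i, j) 0)
      else if memo.contains (i, j) then
        lcsStack s1 s2 f rest memo
      else if PySem.Str.pyGet? s1 (i - 1) = PySem.Str.pyGet? s2 (j - 1) then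
        match memo.get? (i - 1, j - 1) with
        | some d => lcsStack s1 s2 f rest (memo.insert (i, j) (1 + d))
        | none => lcsStack s1 s2 f ((i - 1, j - 1) :: (i, j) :: rest) memo
      else
        match memo.get? (i - 1, j), memo.get? (i, j - 1) with
        | some u, some v => lcsStack s1 s2 f rest (memo.insert (i, j) (max u v))
        | some _, none => lcsStack s1 s2 f ((i, j - 1) :: (i, j) :: rest) memo
        | none, some _ => lcsStack s1 s2 f ((i - 1, j) :: (i, j) :: rest) memo
        | none, none => lcsStack s1 s2 f ((i, j - 1) :: (i - 1, j) :: (i, j) :: rest) memo) := rfl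

theorem lcsN_val_eq (x y : List Char) (a' b' : Nat) (h : x[a']? = y[b']?) :
    1 + ((lcsN x y a' b' : Nat) : Int) = ((lcsN x y (a'+1) (b'+1) : Nat) : Int) := by
  rw [lcsN_succ_succ, if_pos h]
  push_cast
  ring

theorem lcsN_val_ne (x y : List Char) (a' b' : Nat) (h : ¬ (x[a']? = y[b']?)) :
    max ((lcsN x y a' (b'+1) : Nat) : Int) ((lcsN x y (a'+1) b' : Nat) : Int)
      = ((lcsN x y (a'+1) (b'+1) : Nat) : Int) := by
  rw [lcsN_succ_succ, if_neg h, Nat.cast_max]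

-- resolving the cell (a'+1, b'+1) at the top of the stack in ONE loop iteration,
-- given that the children its branch needs are already memoized
theorem parent_step (s1 s2 : String) (a' b' : Nat)
    (memo1 : PySem.Dict (Int × Int) Int) (rest : List (Int × Int)) (fuel : Nat)
    (hf : 1 ≤ fuel)
    (hInv1 : MemoInv s1.toList s2.toList memo1)
    (hD : s1.toList[a']? = s2.toList[b']? →
      memo1.get? ((a' : Int), (b' : Int)) = some ((lcsN s1.toList s2.toList a' b' : Nat) : Int))
    (hL : ¬ (s1.toList[a']? = s2.toList[b']?) →
      memo1.get? ((a' : Int), ((b'+1 : Nat) : Int)) = some ((lcsN s1.toList s2.toList a' (b'+1) : Nat) : Int))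
    (hR : ¬ (s1.toList[a']? = s2.toList[b']?) →
      memo1.get? (((a'+1 : Nat) : Int), (b' : Int)) = some ((lcsN s1.toList s2.toList (a'+1) b' : Nat) : Int)) :
    ∃ memo' : PySem.Dict (Int × Int) Int,
      lcsStack s1 s2 fuel ((((a'+1 : Nat) : Int), ((b'+1 : Nat) : Int)) :: rest) memo1
        = lcsStack s1 s2 (fuel - 1) rest memo' ∧
      MemoInv s1.toList s2.toList memo' ∧ MemoSub memo1 memo' ∧
      memo'.get? (((a'+1 : Nat) : Int), ((b'+1 : Nat) : Int))
        = some ((lcsN s1.toList s2.toList (a'+1) (b'+1) : Nat) : Int) := by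
  obtain ⟨f, rfl⟩ : ∃ f, fuel = f + 1 := ⟨fuel - 1, by omega⟩
  have hf1 : f + 1 - 1 = f := by omega
  rw [hf1, lcsStack_cons_eq]
  have hnb : ¬ (((a'+1 : Nat) : Int) = 0 ∨ ((b'+1 : Nat) : Int) = 0) := by push_cast; omega
  rw [if_neg hnb]
  have hga : PySem.Str.pyGet? s1 (((a'+1 : Nat) : Int) - 1) = s1.toList[a']? := by
    have e : ((a'+1 : Nat) : Int) - 1 = ((a' : Nat) : Int) := by push_cast; ring
    rw [e, PySem.Str.pyGet?_natCast]
  have hgb : PySem.Str.pyGet? s2 (((b'+1 : Nat) : Int) - 1) = s2.toList[b']? := by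
    have e : ((b'+1 : Nat) : Int) - 1 = ((b' : Nat) : Int) := by push_cast; ring
    rw [e, PySem.Str.pyGet?_natCast]
  have ekD : ((((a'+1 : Nat) : Int)) - 1, (((b'+1 : Nat) : Int)) - 1) = (((a' : Nat) : Int), ((b' : Nat) : Int)) := by
    simp only [Prod.mk.injEq]; omega
  have ekL : ((((a'+1 : Nat) : Int)) - 1, (((b'+1 : Nat) : Int))) = (((a' : Nat) : Int), (((b'+1 : Nat) : Int))) := by
    simp only [Prod.mk.injEq]
    exact ⟨by omega, trivial⟩
  have ekR : ((((a'+1 : Nat) : Int)), (((b'+1 : Nat) : Int)) - 1) = ((((a'+1 : Nat) : Int)), ((b' : Nat) : Int)) := by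
    simp only [Prod.mk.injEq]
    exact ⟨trivial, by omega⟩
  cases hc : memo1.get? (((a'+1 : Nat) : Int), ((b'+1 : Nat) : Int)) with
  | some v =>
    have hct : memo1.contains (((a'+1 : Nat) : Int), ((b'+1 : Nat) : Int)) = true := by
      rw [PySem.Dict.contains_eq_isSome_get?, hc]; rfl
    rw [if_pos hct]
    exact ⟨memo1, rfl, hInv1, fun _ _ h => h, by
      rw [hc, hInv1 (a'+1) (b'+1) v hc]⟩
  | none =>
    have hcf : ¬ (memo1.contains (((a'+1 : Nat) : Int), ((b'+1 : Nat) : Int)) = true) := by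
      rw [PySem.Dict.contains_eq_isSome_get?, hc]; simp
    rw [if_neg hcf, hga, hgb]
    by_cases hch : s1.toList[a']? = s2.toList[b']?
    · rw [if_pos hch, ekD, hD hch]
      obtain ⟨hI, hS, hG⟩ := memo_insert_keep s1.toList s2.toList memo1 (a'+1) (b'+1)
        (1 + ((lcsN s1.toList s2.toList a' b' : Nat) : Int)) hInv1
        (lcsN_val_eq s1.toList s2.toList a' b' hch)
      refine ⟨_, rfl, hI, hS, ?_⟩
      rw [hG, lcsN_val_eq s1.toList s2.toList a' b' hch]
    · rw [if_neg hch, ekL, ekR, hL hch, hR hch]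
      obtain ⟨hI, hS, hG⟩ := memo_insert_keep s1.toList s2.toList memo1 (a'+1) (b'+1)
        (max ((lcsN s1.toList s2.toList a' (b'+1) : Nat) : Int) ((lcsN s1.toList s2.toList (a'+1) b' : Nat) : Int)) hInv1
        (lcsN_val_ne s1.toList s2.toList a' b' hch)
      refine ⟨_, rfl, hI, hS, ?_⟩
      rw [hG, lcsN_val_ne s1.toList s2.toList a' b' hch]

-- main lemma: given enough fuel, processing a pushed cell (a,b) pops it with its lcsN value memoized
theorem seg (s1 s2 : String) :
    ∀ (t : Nat) (a b : Nat), a + b ≤ t →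
    ∀ (memo : PySem.Dict (Int × Int) Int) (rest : List (Int × Int)) (fuel : Nat),
      MemoInv s1.toList s2.toList memo →
      3 ^ (a + b + 1) ≤ fuel →
      ∃ (k : Nat) (memo' : PySem.Dict (Int × Int) Int),
        1 ≤ k ∧ k ≤ 3 ^ (a + b + 1) ∧ k ≤ fuel ∧
        lcsStack s1 s2 fuel (((a : Int), (b : Int)) :: rest) memo
          = lcsStack s1 s2 (fuel - k) rest memo' ∧
        MemoInv s1.toList s2.toList memo' ∧ MemoSub memo memo' ∧
        memo'.get? ((a : Int), (b : Int)) = some ((lcsN s1.toList s2.toList a b : Nat) : Int) := by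
  have segBase : ∀ (a b : Nat), (a = 0 ∨ b = 0) →
      ∀ (memo : PySem.Dict (Int × Int) Int) (rest : List (Int × Int)) (fuel : Nat),
        MemoInv s1.toList s2.toList memo → 1 ≤ fuel →
        ∃ (k : Nat) (memo' : PySem.Dict (Int × Int) Int),
          1 ≤ k ∧ k ≤ 3 ^ (a + b + 1) ∧ k ≤ fuel ∧
          lcsStack s1 s2 fuel (((a : Int), (b : Int)) :: rest) memo
            = lcsStack s1 s2 (fuel - k) rest memo' ∧
          MemoInv s1.toList s2.toList memo' ∧ MemoSub memo memo' ∧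
          memo'.get? ((a : Int), (b : Int)) = some ((lcsN s1.toList s2.toList a b : Nat) : Int) := by
    intro a b hab memo rest fuel hInv hf
    obtain ⟨f, rfl⟩ : ∃ f, fuel = f + 1 := ⟨fuel - 1, by omega⟩
    rw [lcsStack_cons_eq]
    have hcond : ((a : Int) = 0 ∨ (b : Int) = 0) := by
      rcases hab with h | h
      · exact Or.inl (by simp [h])
      · exact Or.inr (by simp [h])
    rw [if_pos hcond]
    have h0 : (0 : Int) = ((lcsN s1.toList s2.toList a b : Nat) : Int) := by
      rcases hab with h | h
      · subst h; rw [lcsN_zero_left]; simp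
      · subst h; rw [lcsN_zero_right]; simp
    obtain ⟨hI, hS, hG⟩ := memo_insert_keep s1.toList s2.toList memo a b 0 hInv h0
    refine ⟨1, _, le_refl 1, Nat.one_le_pow _ _ (by norm_num), by omega, ?_, hI, hS, ?_⟩
    · rfl
    · rw [hG, h0]
  intro t
  induction t with
  | zero =>
    intro a b hab memo rest fuel hInv hfuel
    obtain rfl : a = 0 := by omega
    obtain rfl : b = 0 := by omega
    exact segBase 0 0 (Or.inl rfl) memo rest fuel hInv (by
      have := Nat.one_le_pow (0 + 0 + 1) 3 (by norm_num); omega)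
  | succ t ih =>
    intro a b hab memo rest fuel hInv hfuel
    have hf1 : 1 ≤ fuel := by
      have := Nat.one_le_pow (a + b + 1) 3 (by norm_num); omega
    rcases Nat.eq_zero_or_pos a with hA | hA
    · exact segBase a b (Or.inl hA) memo rest fuel hInv hf1
    rcases Nat.eq_zero_or_pos b with hB | hB
    · exact segBase a b (Or.inr hB) memo rest fuel hInv hf1
    obtain ⟨a', rfl⟩ : ∃ a', a = a' + 1 := ⟨a - 1, by omega⟩
    obtain ⟨b', rfl⟩ : ∃ b', b = b' + 1 := ⟨b - 1, by omega⟩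
    -- fuel bookkeeping: everything in terms of P = 3 ^ (a' + b')
    have hP1 : (1 : Nat) ≤ 3 ^ (a' + b') := Nat.one_le_pow _ _ (by norm_num)
    have e1 : 3 ^ (a' + b' + 1) = 3 ^ (a' + b') * 3 := pow_succ 3 _
    have e2 : 3 ^ (a' + b' + 2) = 3 ^ (a' + b') * 9 := by rw [pow_add]; norm_num
    have e3 : 3 ^ (a' + b' + 3) = 3 ^ (a' + b') * 27 := by rw [pow_add]; norm_num
    have efu : 3 ^ (a' + 1 + (b' + 1) + 1) = 3 ^ (a' + b') * 27 := by
      rw [show a' + 1 + (b' + 1) + 1 = a' + b' + 3 from by omega, e3]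
    rw [efu] at hfuel
    obtain ⟨f, rfl⟩ : ∃ f, fuel = f + 1 := ⟨fuel - 1, by omega⟩
    rw [lcsStack_cons_eq]
    have hnb : ¬ (((a'+1 : Nat) : Int) = 0 ∨ ((b'+1 : Nat) : Int) = 0) := by push_cast; omega
    rw [if_neg hnb]
    have hga : PySem.Str.pyGet? s1 (((a'+1 : Nat) : Int) - 1) = s1.toList[a']? := by
      have e : ((a'+1 : Nat) : Int) - 1 = ((a' : Nat) : Int) := by push_cast; ring
      rw [e, PySem.Str.pyGet?_natCast]
    have hgb : PySem.Str.pyGet? s2 (((b'+1 : Nat) : Int) - 1) = s2.toList[b']? := by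
      have e : ((b'+1 : Nat) : Int) - 1 = ((b' : Nat) : Int) := by push_cast; ring
      rw [e, PySem.Str.pyGet?_natCast]
    have ekD : ((((a'+1 : Nat) : Int)) - 1, (((b'+1 : Nat) : Int)) - 1) = (((a' : Nat) : Int), ((b' : Nat) : Int)) := by
      simp only [Prod.mk.injEq]; omega
    have ekL : ((((a'+1 : Nat) : Int)) - 1, (((b'+1 : Nat) : Int))) = (((a' : Nat) : Int), (((b'+1 : Nat) : Int))) := by
      simp only [Prod.mk.injEq]
      exact ⟨by omega, trivial⟩
    have ekR : ((((a'+1 : Nat) : Int)), (((b'+1 : Nat) : Int)) - 1) = ((((a'+1 : Nat) : Int)), ((b' : Nat) : Int)) := by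
      simp only [Prod.mk.injEq]
      exact ⟨trivial, by omega⟩
    cases hc : memo.get? (((a'+1 : Nat) : Int), ((b'+1 : Nat) : Int)) with
    | some v =>
      have hct : memo.contains (((a'+1 : Nat) : Int), ((b'+1 : Nat) : Int)) = true := by
        rw [PySem.Dict.contains_eq_isSome_get?, hc]; rfl
      rw [if_pos hct]
      refine ⟨1, memo, le_refl 1, Nat.one_le_pow _ _ (by norm_num), by omega, rfl, hInv, fun _ _ h => h, ?_⟩
      rw [hc, hInv (a'+1) (b'+1) v hc]
    | none =>
      have hcf : ¬ (memo.contains (((a'+1 : Nat) : Int), ((b'+1 : Nat) : Int)) = true) := by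
        rw [PySem.Dict.contains_eq_isSome_get?, hc]; simp
      rw [if_neg hcf, hga, hgb]
      by_cases hch : s1.toList[a']? = s2.toList[b']?
      · rw [if_pos hch, ekD]
        cases hc3 : memo.get? (((a' : Nat) : Int), ((b' : Nat) : Int)) with
        | some d =>
          simp only [hc3]
          have hd : d = ((lcsN s1.toList s2.toList a' b' : Nat) : Int) := hInv a' b' d hc3
          have hv : 1 + d = ((lcsN s1.toList s2.toList (a'+1) (b'+1) : Nat) : Int) := by
            rw [hd]; exact lcsN_val_eq s1.toList s2.toList a' b' hch
          obtain ⟨hI, hS, hG⟩ := memo_insert_keep s1.toList s2.toList memo (a'+1) (b'+1) (1 + d) hInv hv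
          refine ⟨1, _, le_refl 1, Nat.one_le_pow _ _ (by norm_num), by omega, rfl, hI, hS, ?_⟩
          rw [hG, hv]
        | none =>
          simp only [hc3]
          obtain ⟨k1, memo1, hk11, hk12, hk13, hrun1, hInv1, hSub1, hchild⟩ :=
            ih a' b' (by omega) memo ((((a'+1 : Nat) : Int), ((b'+1 : Nat) : Int)) :: rest) f hInv
              (by rw [e1]; omega)
          rw [e1] at hk12
          rw [hrun1]
          obtain ⟨memo', hrun2, hInv', hSub2, hget'⟩ :=
            parent_step s1 s2 a' b' memo1 rest (f - k1) (by omega) hInv1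
              (fun _ => hchild) (fun h => absurd hch h) (fun h => absurd hch h)
          rw [hrun2]
          refine ⟨k1 + 2, memo', by omega, by omega, by omega, ?_, hInv', memoSub_trans hSub1 hSub2, hget'⟩
          have : f + 1 - (k1 + 2) = f - k1 - 1 := by omega
          rw [this]
      · rw [if_neg hch, ekL, ekR]
        cases hcL : memo.get? (((a' : Nat) : Int), (((b'+1 : Nat) : Int))) with
        | some u =>
          cases hcR : memo.get? ((((a'+1 : Nat) : Int)), ((b' : Nat) : Int)) with
          | some v =>
            simp only [hcL, hcR]
            have hv : max u v = ((lcsN s1.toList s2.toList (a'+1) (b'+1) : Nat) : Int) := by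
              rw [hInv a' (b'+1) u hcL, hInv (a'+1) b' v hcR]
              exact lcsN_val_ne s1.toList s2.toList a' b' hch
            obtain ⟨hI, hS, hG⟩ := memo_insert_keep s1.toList s2.toList memo (a'+1) (b'+1) (max u v) hInv hv
            refine ⟨1, _, le_refl 1, Nat.one_le_pow _ _ (by norm_num), by omega, rfl, hI, hS, ?_⟩
            rw [hG, hv]
          | none =>
            simp only [hcL, hcR]
            obtain ⟨k1, memo1, hk11, hk12, hk13, hrun1, hInv1, hSub1, hchild⟩ :=
              ih (a'+1) b' (by omega) memo ((((a'+1 : Nat) : Int), ((b'+1 : Nat) : Int)) :: rest) f hInv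
                (by rw [show a' + 1 + b' + 1 = a' + b' + 2 from by omega, e2]; omega)
            rw [show a' + 1 + b' + 1 = a' + b' + 2 from by omega, e2] at hk12
            rw [hrun1]
            have hLm : memo1.get? (((a' : Nat) : Int), (((b'+1 : Nat) : Int))) = some ((lcsN s1.toList s2.toList a' (b'+1) : Nat) : Int) := by
              have h := hSub1 _ _ hcL
              rw [hInv a' (b'+1) u hcL] at h
              exact h
            obtain ⟨memo', hrun2, hInv', hSub2, hget'⟩ :=
              parent_step s1 s2 a' b' memo1 rest (f - k1) (by omega) hInv1
                (fun h => absurd h hch) (fun _ => hLm) (fun _ => hchild)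
            rw [hrun2]
            refine ⟨k1 + 2, memo', by omega, by omega, by omega, ?_, hInv', memoSub_trans hSub1 hSub2, hget'⟩
            have : f + 1 - (k1 + 2) = f - k1 - 1 := by omega
            rw [this]
        | none =>
          cases hcR : memo.get? ((((a'+1 : Nat) : Int)), ((b' : Nat) : Int)) with
          | some v =>
            simp only [hcL, hcR]
            obtain ⟨k1, memo1, hk11, hk12, hk13, hrun1, hInv1, hSub1, hchild⟩ :=
              ih a' (b'+1) (by omega) memo ((((a'+1 : Nat) : Int), ((b'+1 : Nat) : Int)) :: rest) f hInv
                (by rw [show a' + (b' + 1) + 1 = a' + b' + 2 from by omega, e2]; omega)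
            rw [show a' + (b' + 1) + 1 = a' + b' + 2 from by omega, e2] at hk12
            rw [hrun1]
            have hRm : memo1.get? ((((a'+1 : Nat) : Int)), ((b' : Nat) : Int)) = some ((lcsN s1.toList s2.toList (a'+1) b' : Nat) : Int) := by
              have h := hSub1 _ _ hcR
              rw [hInv (a'+1) b' v hcR] at h
              exact h
            obtain ⟨memo', hrun2, hInv', hSub2, hget'⟩ :=
              parent_step s1 s2 a' b' memo1 rest (f - k1) (by omega) hInv1
                (fun h => absurd h hch) (fun _ => hchild) (fun _ => hRm)
            rw [hrun2]
            refine ⟨k1 + 2, memo', by omega, by omega, by omega, ?_, hInv', memoSub_trans hSub1 hSub2, hget'⟩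
            have : f + 1 - (k1 + 2) = f - k1 - 1 := by omega
            rw [this]
          | none =>
            obtain ⟨k1, memo1, hk11, hk12, hk13, hrun1, hInv1, hSub1, hchild1⟩ :=
              ih (a'+1) b' (by omega) memo
                ((((a' : Nat) : Int), ((b'+1 : Nat) : Int)) :: (((a'+1 : Nat) : Int), ((b'+1 : Nat) : Int)) :: rest) f hInv
                (by rw [show a' + 1 + b' + 1 = a' + b' + 2 from by omega, e2]; omega)
            rw [show a' + 1 + b' + 1 = a' + b' + 2 from by omega, e2] at hk12
            rw [hrun1]
            obtain ⟨k2, memo2, hk21, hk22, hk23, hrun2, hInv2, hSub2, hchild2⟩ :=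
              ih a' (b'+1) (by omega) memo1 ((((a'+1 : Nat) : Int), ((b'+1 : Nat) : Int)) :: rest) (f - k1) hInv1
                (by rw [show a' + (b' + 1) + 1 = a' + b' + 2 from by omega, e2]; omega)
            rw [show a' + (b' + 1) + 1 = a' + b' + 2 from by omega, e2] at hk22
            rw [hrun2]
            have hRm : memo2.get? ((((a'+1 : Nat) : Int)), ((b' : Nat) : Int)) = some ((lcsN s1.toList s2.toList (a'+1) b' : Nat) : Int) :=
              hSub2 _ _ hchild1
            obtain ⟨memo', hrun3, hInv', hSub3, hget'⟩ :=
              parent_step s1 s2 a' b' memo2 rest (f - k1 - k2) (by omega) hInv2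
                (fun h => absurd h hch) (fun _ => hchild2) (fun _ => hRm)
            rw [hrun3]
            refine ⟨k1 + k2 + 2, memo', by omega, by omega, by omega, ?_, hInv',
              memoSub_trans hSub1 (memoSub_trans hSub2 hSub3), hget'⟩
            have : f + 1 - (k1 + k2 + 2) = f - k1 - k2 - 1 := by omega
            rw [this]

-- ===== VERDICT (by name: the statement is the Claim_ definition above) =====
theorem canYouMake_spec : Claim_equal_canYouMake := by
  intro s1 s2 _
  unfold Spec_canYouMake
  rw [A_eq_lcsN]
  unfold canYouMake_alt
  simp only [PySem.Str.len_eq]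
  set n := s1.toList.length with hn
  set m := s2.toList.length with hm
  have hfuel : 3 ^ (n + m + 1) ≤ 3 ^ (n + m + 2) := Nat.pow_le_pow_right (by norm_num) (by omega)
  obtain ⟨k, memo', hk1, hk2, hk3, hrun, hInv', hSub, hget⟩ :=
    seg s1 s2 (n + m) n m (le_refl _) PySem.Dict.empty [] (3 ^ (n + m + 2))
      (by intro a b v hv; rw [PySem.Dict.get?_empty] at hv; exact absurd hv (by simp)) hfuel
  rw [hrun]
  have hnil : lcsStack s1 s2 (3 ^ (n + m + 2) - k) [] memo' = memo' := by
    cases h : 3 ^ (n + m + 2) - k <;> rfl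
  rw [hnil]
  rw [PySem.Dict.getD_eq_get?_getD, hget]
  rfl
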